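-- pv_equiv track=rewrite | github.com/sunnysunny061/hackerank-problems-pyhton- | electronics shop.py | getMoneySpent
-- ===== SOURCE A (Python) =====
-- def getMoneySpent(keyboards, drives, b):
--     arr=[]
--     for i in range(0,len(keyboards)):
--         for j in range(0,len(drives)):
--             c=keyboards[i]+drives[j]
--             if(c<b+1):
--                 arr.append(c)
--     if (len(arr)==0):
--         return -1
--     else:
--         return (max(arr))
-- ===== SOURCE B (Python) =====
-- def getMoneySpent(keyboards, drives, b):
--     # Sort the drives once; for each keyboard binary-search the most
--     # expensive drive that still fits the remaining budget.
--     ds = sorted(drives)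
--     best = None
--     for k in keyboards:
--         t = b - k
--         lo, hi = 0, len(ds)          # hand-written bisect_right(ds, t)
--         while lo < hi:
--             mid = (lo + hi) // 2
--             if ds[mid] <= t:
--                 lo = mid + 1
--             else:
--                 hi = mid
--         if lo > 0:
--             s = k + ds[lo - 1]
--             if best is None or s > best:
--                 best = s
--     return -1 if best is None else best
-- ===== Notes on version B (the rewrite author's own statement) =====
-- stated objective: faster
-- what changed: Instead of enumerating every keyboard/drive pair into a list and taking its max, B sorts the drives once and for each keyboard binary-searches (bisect_right) the most expensive drive that still fits the budget, keeping a running best.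
import Mathlib
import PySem

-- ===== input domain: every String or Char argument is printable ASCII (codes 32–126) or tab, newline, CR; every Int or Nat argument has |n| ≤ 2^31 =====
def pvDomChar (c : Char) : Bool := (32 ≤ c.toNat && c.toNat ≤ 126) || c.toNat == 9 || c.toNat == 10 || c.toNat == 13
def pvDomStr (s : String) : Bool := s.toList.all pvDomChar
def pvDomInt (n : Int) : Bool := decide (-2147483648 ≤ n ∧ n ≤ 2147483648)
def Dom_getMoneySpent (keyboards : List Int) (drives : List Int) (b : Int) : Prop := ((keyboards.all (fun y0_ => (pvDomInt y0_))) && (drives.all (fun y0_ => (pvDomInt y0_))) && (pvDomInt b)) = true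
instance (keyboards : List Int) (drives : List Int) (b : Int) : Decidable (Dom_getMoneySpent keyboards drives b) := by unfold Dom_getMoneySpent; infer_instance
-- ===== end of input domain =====

-- B sorts the drives once and binary-searches the best affordable drive per
-- keyboard instead of A's scan over all keyboard/drive pairs (objective: faster).


-- ===== PORT A =====
def getMoneySpent (keyboards : List Int) (drives : List Int) (b : Int) : Int :=
  let arr : List Int :=
    (PySem.List.pyRange 0 (keyboards.length : Int) 1).foldl (fun arr i =>
      (PySem.List.pyRange 0 (drives.length : Int) 1).foldl (fun arr j =>
        if PySem.List.pyGetD keyboards i 0 + PySem.List.pyGetD drives j 0 < b + 1 then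
          arr ++ [PySem.List.pyGetD keyboards i 0 + PySem.List.pyGetD drives j 0]
        else arr) arr) []
  if arr.length = 0 then -1
  else (PySem.List.max? arr (fun x => x)).getD 0   -- arr ≠ [] here, so max? = some: Python's max(arr)

-- ===== PORT B =====
-- Source B's hand-written lo/hi loop is exactly stdlib bisect_right; ported as the prelude primitive.
def getMoneySpent_alt (keyboards : List Int) (drives : List Int) (b : Int) : Int :=
  let ds := PySem.List.sorted drives (fun x => x)
  let best := keyboards.foldl (fun best k =>
    let lo := PySem.List.bisectRight ds (b - k)
    if lo > 0 then
      let s := k + ds.getD (lo - 1) 0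
      match best with
      | none => some s
      | some v => if s > v then some s else best
    else best) none
  match best with
  | none => -1
  | some v => v

-- ===== PRECONDITION & SPEC =====
def Spec_getMoneySpent (keyboards : List Int) (drives : List Int) (b : Int) (out : Int) : Prop := out = getMoneySpent_alt keyboards drives b
instance (keyboards : List Int) (drives : List Int) (b : Int) (out : Int) : Decidable (Spec_getMoneySpent keyboards drives b out) := by unfold Spec_getMoneySpent; infer_instance

-- ===== CLAIM (what is proved, stated in full; the proofs are below) =====
def Claim_equal_getMoneySpent : Prop := ∀ (keyboards : List Int) (drives : List Int) (b : Int), Dom_getMoneySpent keyboards drives b → Spec_getMoneySpent keyboards drives b (getMoneySpent keyboards drives b)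

-- ===== LEMMAS AND PROOFS =====

-- the sums one keyboard k contributes to A's arr
def pvBlock (drives : List Int) (b k : Int) : List Int :=
  (drives.filter (fun d => decide (k + d < b + 1))).map (fun d => k + d)

-- optional maximum (Python's best-so-far with the None sentinel)
def pvOMax (xs : List Int) : Option Int :=
  match xs with
  | [] => none
  | x :: t => some (t.foldl max x)

def pvOMerge (o1 o2 : Option Int) : Option Int :=
  match o1, o2 with
  | none, o => o
  | some a, none => some a
  | some a, some c => some (max a c)

theorem pvOMerge_none_left (o : Option Int) : pvOMerge none o = o := by cases o <;> rfl

theorem pvOMerge_assoc (o1 o2 o3 : Option Int) :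
    pvOMerge (pvOMerge o1 o2) o3 = pvOMerge o1 (pvOMerge o2 o3) := by
  cases o1 <;> cases o2 <;> cases o3 <;> simp [pvOMerge, max_assoc]

theorem pvOMax_append (xs ys : List Int) :
    pvOMax (xs ++ ys) = pvOMerge (pvOMax xs) (pvOMax ys) := by
  cases xs with
  | nil => simp [pvOMax, pvOMerge_none_left]
  | cons x t =>
    cases ys with
    | nil => simp [pvOMax, pvOMerge]
    | cons y u =>
      simp only [pvOMax, pvOMerge, List.cons_append, List.foldl_append, List.foldl_cons]
      rw [List.foldl_assoc]

theorem pvOMax_eq_some (xs : List Int) (v : Int) (hv : v ∈ xs) (hmax : ∀ y ∈ xs, y ≤ v) :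
    pvOMax xs = some v := by
  cases xs with
  | nil => simp at hv
  | cons x t =>
    simp only [pvOMax, Option.some.injEq]
    have h1 := PySem.List.le_foldl_max t x
    have hle : t.foldl max x ≤ v := by
      rcases PySem.List.foldl_max_mem t x with h | h
      · rw [h]; exact hmax x (List.mem_cons_self)
      · exact hmax _ (List.mem_cons_of_mem _ h)
    have hge : v ≤ t.foldl max x := by
      rcases List.mem_cons.mp hv with h | h
      · rw [h] at *; exact h1.1
      · exact h1.2 v h
    omega

-- A's arr is the concatenation of the per-keyboard blocks
theorem pvArr_eq (keyboards drives : List Int) (b : Int) :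
    (PySem.List.pyRange 0 (keyboards.length : Int) 1).foldl (fun arr i =>
      (PySem.List.pyRange 0 (drives.length : Int) 1).foldl (fun arr j =>
        if PySem.List.pyGetD keyboards i 0 + PySem.List.pyGetD drives j 0 < b + 1 then
          arr ++ [PySem.List.pyGetD keyboards i 0 + PySem.List.pyGetD drives j 0]
        else arr) arr) []
    = keyboards.flatMap (fun k => pvBlock drives b k) := by
  have inner : ∀ (k : Int) (acc : List Int),
      drives.foldl (fun arr d => if k + d < b + 1 then arr ++ [k + d] else arr) acc
        = acc ++ pvBlock drives b k := by
    intro k acc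
    rw [PySem.List.foldl_append_ite (p := fun d => k + d < b + 1) (f := fun d => k + d)]
    rfl
  rw [PySem.List.foldl_pyRange_zero_pyGetD' keyboards 0
      (fun arr k =>
        (PySem.List.pyRange 0 (drives.length : Int) 1).foldl (fun arr j =>
          if k + PySem.List.pyGetD drives j 0 < b + 1 then
            arr ++ [k + PySem.List.pyGetD drives j 0]
          else arr) arr) []]
  have houter : ∀ (acc : List Int) (k : Int), k ∈ keyboards →
      (PySem.List.pyRange 0 (drives.length : Int) 1).foldl (fun arr j =>
        if k + PySem.List.pyGetD drives j 0 < b + 1 then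
          arr ++ [k + PySem.List.pyGetD drives j 0]
        else arr) acc = acc ++ pvBlock drives b k := by
    intro acc k _
    rw [PySem.List.foldl_pyRange_zero_pyGetD' drives 0
        (fun arr d => if k + d < b + 1 then arr ++ [k + d] else arr) acc]
    exact inner k acc
  rw [PySem.List.foldl_congr_mem keyboards _ (fun arr k => arr ++ pvBlock drives b k) [] houter]
  rw [PySem.List.foldl_append_eq_flatMap]
  simp

-- the per-keyboard candidate B computes, as a function of the sorted list
def pvCand (ds : List Int) (b k : Int) : Option Int :=
  if PySem.List.bisectRight ds (b - k) > 0 then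
    some (k + ds.getD (PySem.List.bisectRight ds (b - k) - 1) 0)
  else none

-- B's candidate for keyboard k is exactly the optional max of A's block for k
theorem pvCand_eq (drives : List Int) (b k : Int) :
    pvCand (PySem.List.sorted drives (fun x => x)) b k = pvOMax (pvBlock drives b k) := by
  set ds := PySem.List.sorted drives (fun x => x) with hds
  have hsort : ds.Pairwise (· ≤ ·) := PySem.List.sorted_pairwise drives (fun x => x)
  obtain ⟨hlen, hlow, hhigh⟩ := PySem.List.bisectRight_spec ds (b - k) hsort
  have hmemds : ∀ d : Int, d ∈ ds ↔ d ∈ drives :=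
    fun d => PySem.List.mem_sorted drives (fun x => x) false d
  by_cases hr : PySem.List.bisectRight ds (b - k) > 0
  · -- some case: the found drive is the max affordable one
    set r := PySem.List.bisectRight ds (b - k) with hrdef
    have hr1 : r - 1 < ds.length := by omega
    have hgetD : ds.getD (r - 1) 0 = ds[r - 1] := List.getD_eq_getElem ds 0 hr1
    have hdle : ds[r - 1] ≤ b - k := hlow (r - 1) hr1 (by omega)
    have hmem : k + ds[r - 1] ∈ pvBlock drives b k := by
      simp only [pvBlock, List.mem_map, List.mem_filter]
      exact ⟨ds[r - 1], ⟨(hmemds _).mp (ds.getElem_mem hr1), by simp; omega⟩, rfl⟩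
    have hmax : ∀ y ∈ pvBlock drives b k, y ≤ k + ds[r - 1] := by
      intro y hy
      simp only [pvBlock, List.mem_map, List.mem_filter] at hy
      obtain ⟨d, ⟨hdmem, hdlt⟩, rfl⟩ := hy
      simp at hdlt
      have hdds : d ∈ ds := (hmemds d).mpr hdmem
      obtain ⟨j, hj, hjd⟩ := List.mem_iff_getElem.mp hdds
      have : j < r := by
        by_contra hge
        have := hhigh j hj (by omega)
        omega
      have : ds[j] ≤ ds[r - 1] := by
        have := PySem.List.sorted_id_getElem_mono (xs := drives) (p := j) (q := r - 1)
          (by omega) (by rw [← hds]; omega)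
        simpa [← hds] using this
      omega
    rw [pvCand, if_pos hr, hgetD, pvOMax_eq_some _ _ hmem hmax]
  · -- none case: no drive fits the budget, the block is empty
    have hempty : pvBlock drives b k = [] := by
      simp only [pvBlock, List.map_eq_nil_iff, List.filter_eq_nil_iff]
      intro d hd
      obtain ⟨j, hj, hjd⟩ := List.mem_iff_getElem.mp ((hmemds d).mpr hd)
      have := hhigh j hj (by omega)
      simp; omega
    rw [pvCand, if_neg hr, hempty]; rfl

theorem pvStep_eq (ds : List Int) (b k : Int) (best : Option Int) :
    (let lo := PySem.List.bisectRight ds (b - k)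
     if lo > 0 then
       let s := k + ds.getD (lo - 1) 0
       match best with
       | none => some s
       | some v => if s > v then some s else best
     else best) = pvOMerge best (pvCand ds b k) := by
  unfold pvCand pvOMerge
  by_cases h : PySem.List.bisectRight ds (b - k) > 0
  · cases best with
    | none => simp [h]
    | some v =>
      simp only [h, if_true, gt_iff_lt]
      split_ifs with hs
      · rw [max_eq_right (le_of_lt hs)]
      · rw [max_eq_left (not_lt.mp hs)]
  · cases best <;> simp [h]

-- folding pvOMerge starting from any accumulator
theorem pvOMerge_foldl (ds : List Int) (b : Int) (t : List Int) (o : Option Int) :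
    t.foldl (fun o k => pvOMerge o (pvCand ds b k)) o
      = pvOMerge o (t.foldl (fun o k => pvOMerge o (pvCand ds b k)) none) := by
  induction t generalizing o with
  | nil => cases o <;> rfl
  | cons k t ih =>
    simp only [List.foldl_cons]
    rw [ih (pvOMerge o (pvCand ds b k)), ih (pvOMerge none (pvCand ds b k)),
        pvOMerge_none_left, pvOMerge_assoc]

-- B's whole loop computes the merge of the per-keyboard candidates
theorem pvFold_eq (ds : List Int) (b : Int) (ks : List Int) (best : Option Int) :
    ks.foldl (fun best k =>
      let lo := PySem.List.bisectRight ds (b - k)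
      if lo > 0 then
        let s := k + ds.getD (lo - 1) 0
        match best with
        | none => some s
        | some v => if s > v then some s else best
      else best) best
    = pvOMerge best (ks.foldl (fun o k => pvOMerge o (pvCand ds b k)) none) := by
  induction ks generalizing best with
  | nil => cases best <;> rfl
  | cons k t ih =>
    simp only [List.foldl_cons]
    rw [pvStep_eq, ih, pvOMerge_foldl ds b t (pvOMerge none (pvCand ds b k)),
        pvOMerge_none_left, pvOMerge_assoc]

-- the candidate fold is the optional max of A's arr
theorem pvFold_eq_omax (drives : List Int) (b : Int) (ks : List Int) :
    ks.foldl (fun o k => pvOMerge o (pvCand (PySem.List.sorted drives (fun x => x)) b k)) none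
      = pvOMax (ks.flatMap (fun k => pvBlock drives b k)) := by
  induction ks with
  | nil => rfl
  | cons k t ih =>
    simp only [List.foldl_cons, List.flatMap_cons]
    rw [pvOMerge_foldl, ih, pvOMerge_none_left, pvCand_eq, pvOMax_append]

-- ===== VERDICT (by name: the statement is the Claim_ definition above) =====
theorem getMoneySpent_spec : Claim_equal_getMoneySpent := by
  intro keyboards drives b _
  simp only [Spec_getMoneySpent, getMoneySpent, getMoneySpent_alt]
  rw [pvArr_eq, pvFold_eq, pvOMerge_none_left, pvFold_eq_omax]
  cases h : keyboards.flatMap (fun k => pvBlock drives b k) with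
  | nil => rfl
  | cons x t =>
    simp only [pvOMax, List.length_cons, PySem.List.max?_id_cons]
    simp
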